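-- pv_equiv track=rewrite | github.com/renancmd/the-chunker | core.py | classify_regions
-- ===== SOURCE A (Python) =====
-- CHUNK_SIZE = 1024  # Hytale region size in blocks
--
-- def block_to_region(block_x, block_z):
--     """
--     Converts In-Game Block coordinates to Region File coordinates.
--     """
--     # Floor division (//) handles negative coordinates correctly
--     rx = int(block_x) // CHUNK_SIZE
--     ry = int(block_z) // CHUNK_SIZE
--     return rx, ry
--
-- def classify_regions(regions, bases_list, radius):
--     """
--     Separates regions into Protected and Reset lists.
--     A region is protected if it is within the radius of ANY of the provided bases.
--     """
--     protected = []
--     reset = []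
--
--     # Convert all user block coordinates to region coordinates first
--     # bases_list format: [(x1, z1), (x2, z2), ...]
--     base_regions_coords = [block_to_region(bx, bz) for bx, bz in bases_list]
--
--     for r in regions:
--         is_protected = False
--
--         # Check distance against ALL bases
--         for bx, by in base_regions_coords:
--             # Chebyshev Distance (Square shape)
--             dist_x = abs(r["x"] - bx)
--             dist_y = abs(r["y"] - by)
--             distance = max(dist_x, dist_y)
--
--             if distance <= radius:
--                 is_protected = True
--                 break # It's near one base, so it's safe. No need to check others.
--
--         if is_protected:
--             protected.append(r)
--         else:
--             reset.append(r)
--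
--     return protected, reset, base_regions_coords
-- ===== SOURCE B (Python) =====
-- CHUNK_SIZE = 1024  # Hytale region size in blocks
--
--
-- def classify_regions(regions, bases_list, radius):
--     """Inverted loop nesting: sweep bases on the outside over a shrinking pool of
--     still-unprotected (index, region) pairs; a final sort by index restores the
--     input order of the protected regions."""
--     coords = [(int(bx) // CHUNK_SIZE, int(bz) // CHUNK_SIZE) for bx, bz in bases_list]
--
--     remaining = list(enumerate(regions))
--     hits = []
--     for bx, by in coords:
--         still = []
--         for i, r in remaining:
--             if max(abs(r["x"] - bx), abs(r["y"] - by)) <= radius: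
--                 hits.append((i, r))
--             else:
--                 still.append((i, r))
--         remaining = still
--
--     hits.sort(key=lambda p: p[0])
--     protected = [r for _, r in hits]
--     reset = [r for _, r in remaining]
--     return protected, reset, coords
-- ===== Notes on version B (the rewrite author's own statement) =====
-- stated objective: alternative
-- what changed: Loop nesting is inverted: instead of A's region-outer loop with an inner break-on-hit scan of all bases, B sweeps the bases on the outside over a shrinking pool of still-unprotected (index, region) pairs, accumulating hits and restoring input order with a final sort by index.
import Mathlib
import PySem

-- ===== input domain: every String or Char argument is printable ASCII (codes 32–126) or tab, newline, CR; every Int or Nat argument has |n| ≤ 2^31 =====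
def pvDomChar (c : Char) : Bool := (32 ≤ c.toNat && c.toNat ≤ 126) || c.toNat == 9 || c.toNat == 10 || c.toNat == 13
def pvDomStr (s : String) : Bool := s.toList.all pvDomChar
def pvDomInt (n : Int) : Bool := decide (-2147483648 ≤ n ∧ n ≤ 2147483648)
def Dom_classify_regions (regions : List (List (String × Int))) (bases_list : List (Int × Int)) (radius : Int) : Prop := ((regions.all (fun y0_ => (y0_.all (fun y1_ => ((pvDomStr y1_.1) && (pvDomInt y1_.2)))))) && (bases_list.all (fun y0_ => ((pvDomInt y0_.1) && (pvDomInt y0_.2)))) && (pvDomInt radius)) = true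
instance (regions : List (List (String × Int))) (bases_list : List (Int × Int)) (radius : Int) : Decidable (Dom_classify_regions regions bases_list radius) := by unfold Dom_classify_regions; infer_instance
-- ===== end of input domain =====

-- B inverts the loop nesting: bases on the outside sweep a shrinking pool of still-unprotected
-- (index, region) pairs, and a final sort by index restores the input order (objective: alternative).

-- ===== PORT A =====
-- dict access r[k]: first-match lookup in the association list (exact for Python dicts)
def pvLookup (r : List (String × Int)) (k : String) : Option Int :=
  match r with
  | [] => none
  | (k', v) :: rest => if k' == k then some v else pvLookup rest k

def block_to_region (block_x : Int) (block_z : Int) : Int × Int :=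
  (PySem.Int.floordiv block_x 1024, PySem.Int.floordiv block_z 1024)

-- inner `for bx, by in base_regions_coords: ... break` loop of A
def pvCheckBases (r : List (String × Int)) (radius : Int) : List (Int × Int) → Bool
  | [] => false
  | (bx, by_) :: rest =>
    let dist_x := |(pvLookup r "x").getD 0 - bx|
    let dist_y := |(pvLookup r "y").getD 0 - by_|
    if max dist_x dist_y ≤ radius then true else pvCheckBases r radius rest

def classify_regions (regions : List (List (String × Int))) (bases_list : List (Int × Int)) (radius : Int) : (List (List (String × Int))) × (List (List (String × Int))) × (List (Int × Int)) :=
  let base_regions_coords := bases_list.map (fun b => block_to_region b.1 b.2)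
  let pr := regions.foldl
    (fun (acc : List (List (String × Int)) × List (List (String × Int))) r =>
      if pvCheckBases r radius base_regions_coords then (acc.1 ++ [r], acc.2)
      else (acc.1, acc.2 ++ [r])) ([], [])
  (pr.1, pr.2, base_regions_coords)

-- ===== PORT B =====
-- the Chebyshev test against one base coordinate
def pvNearC (radius : Int) (c : Int × Int) (r : List (String × Int)) : Bool :=
  decide (max |(pvLookup r "x").getD 0 - c.1| |(pvLookup r "y").getD 0 - c.2| ≤ radius)

-- body of B's outer loop: one base sweeps the remaining pool, splitting it into hits/still
def pvSweep (radius : Int)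
    (st : List (Int × List (String × Int)) × List (Int × List (String × Int)))
    (c : Int × Int) : List (Int × List (String × Int)) × List (Int × List (String × Int)) :=
  st.2.foldl
    (fun (acc : List (Int × List (String × Int)) × List (Int × List (String × Int))) p =>
      if pvNearC radius c p.2 then (acc.1 ++ [p], acc.2) else (acc.1, acc.2 ++ [p]))
    (st.1, [])

def classify_regions_alt (regions : List (List (String × Int))) (bases_list : List (Int × Int)) (radius : Int) : (List (List (String × Int))) × (List (List (String × Int))) × (List (Int × Int)) :=
  let coords := bases_list.map (fun b => (PySem.Int.floordiv b.1 1024, PySem.Int.floordiv b.2 1024))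
  let st := coords.foldl (pvSweep radius) ([], PySem.List.enumerate regions 0)
  let hits := PySem.List.sorted st.1 (fun p => p.1) false
  (hits.map (fun p => p.2), st.2.map (fun p => p.2), coords)

-- ===== PRECONDITION & SPEC =====
-- Pre_ excludes exactly the inputs on which Python A raises KeyError: some region missing
-- key "x" or "y" while bases_list is nonempty (with no bases the keys are never accessed).
def Pre_classify_regions (regions : List (List (String × Int))) (bases_list : List (Int × Int)) (radius : Int) : Prop :=
  bases_list = [] ∨ ∀ r ∈ regions, "x" ∈ r.map Prod.fst ∧ "y" ∈ r.map Prod.fst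
instance (regions : List (List (String × Int))) (bases_list : List (Int × Int)) (radius : Int) : Decidable (Pre_classify_regions regions bases_list radius) := by unfold Pre_classify_regions; infer_instance
def pvWitness_classify_regions : (List (List (String × Int))) × (List (Int × Int)) × Int :=
  ([[("x", 1), ("y", 2)], [("x", 5000), ("y", 0)]], [(100, 200)], 1)

def Spec_classify_regions (regions : List (List (String × Int))) (bases_list : List (Int × Int)) (radius : Int) (out : (List (List (String × Int))) × (List (List (String × Int))) × (List (Int × Int))) : Prop := out = classify_regions_alt regions bases_list radius
instance (regions : List (List (String × Int))) (bases_list : List (Int × Int)) (radius : Int) (out : (List (List (String × Int))) × (List (List (String × Int))) × (List (Int × Int))) : Decidable (Spec_classify_regions regions bases_list radius out) := by unfold Spec_classify_regions; infer_instance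

-- ===== CLAIM (what is proved, stated in full; the proofs are below) =====
def Claim_equal_classify_regions : Prop := ∀ (regions : List (List (String × Int))) (bases_list : List (Int × Int)) (radius : Int), Dom_classify_regions regions bases_list radius → Pre_classify_regions regions bases_list radius → Spec_classify_regions regions bases_list radius (classify_regions regions bases_list radius)

-- ===== LEMMAS AND PROOFS =====

-- A's break-on-hit scan is `any` over the coordinate list
theorem pvCheckBases_eq_any (r : List (String × Int)) (radius : Int) (bs : List (Int × Int)) :
    pvCheckBases r radius bs = bs.any (fun c => pvNearC radius c r) := by
  induction bs with
  | nil => rfl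
  | cons b rest ih =>
    obtain ⟨bx, by_⟩ := b
    simp only [pvCheckBases, pvNearC, List.any_cons] at *
    split_ifs with h
    · simp [h]
    · simp [h, ih]

-- the append-accumulator partition fold, generically
theorem pvFoldl_partition {α : Type} (p : α → Bool) (l a b : List α) :
    l.foldl (fun (acc : List α × List α) x =>
        if p x then (acc.1 ++ [x], acc.2) else (acc.1, acc.2 ++ [x])) (a, b)
      = (a ++ l.filter p, b ++ l.filter (fun x => !p x)) := by
  induction l generalizing a b with
  | nil => simp
  | cons x rest ih =>
    simp only [List.foldl_cons, List.filter_cons]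
    by_cases h : p x
    · simp [h, ih]
    · simp [h, ih]

theorem pvSweep_eq (radius : Int) (st : List (Int × List (String × Int)) × List (Int × List (String × Int))) (c : Int × Int) :
    pvSweep radius st c
      = (st.1 ++ st.2.filter (fun p => pvNearC radius c p.2),
         st.2.filter (fun p => !pvNearC radius c p.2)) := by
  unfold pvSweep
  rw [pvFoldl_partition (fun p => pvNearC radius c p.2) st.2 st.1 []]
  simp

-- splitting by p then filtering the rest by q is, up to permutation, filtering by p ∨ q
theorem pvFilter_split_perm {α : Type} (p q : α → Bool) (l : List α) :
    (l.filter p ++ (l.filter (fun x => !p x)).filter q).Perm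
      (l.filter (fun x => p x || q x)) := by
  induction l with
  | nil => simp
  | cons x rest ih =>
    by_cases hp : p x
    · simpa [hp] using ih.cons x
    · by_cases hq : q x
      · have h1 : (x :: rest).filter p = rest.filter p := by simp [hp]
        have h2 : ((x :: rest).filter (fun y => !p y)).filter q
            = x :: (rest.filter (fun y => !p y)).filter q := by simp [hp, hq]
        have h3 : (x :: rest).filter (fun y => p y || q y)
            = x :: rest.filter (fun y => p y || q y) := by simp [hp, hq]
        rw [h1, h2, h3]
        exact (List.perm_middle).trans (ih.cons x)
      · simpa [hp, hq] using ih

-- invariant of B's outer fold over the base coordinates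
set_option maxHeartbeats 1000000 in
theorem pvFold_sweep (radius : Int) (cs : List (Int × Int))
    (hs rem : List (Int × List (String × Int))) :
    (cs.foldl (pvSweep radius) (hs, rem)).2
        = rem.filter (fun p => !(cs.any (fun c => pvNearC radius c p.2)))
    ∧ (cs.foldl (pvSweep radius) (hs, rem)).1.Perm
        (hs ++ rem.filter (fun p => cs.any (fun c => pvNearC radius c p.2))) := by
  induction cs generalizing hs rem with
  | nil => simp
  | cons c rest ih =>
    simp only [List.foldl_cons, pvSweep_eq]
    obtain ⟨ih2, ih1⟩ := ih (hs ++ rem.filter (fun p => pvNearC radius c p.2))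
      (rem.filter (fun p => !pvNearC radius c p.2))
    constructor
    · rw [ih2, List.filter_filter]
      exact List.filter_congr (fun x _ => by simp [Bool.not_or, Bool.and_comm])
    · have hsplit : (rem.filter (fun p => pvNearC radius c p.2) ++
          (rem.filter (fun p => !pvNearC radius c p.2)).filter
            (fun p => rest.any (fun c' => pvNearC radius c' p.2))).Perm
          (rem.filter (fun p => pvNearC radius c p.2 || rest.any (fun c' => pvNearC radius c' p.2))) :=
        pvFilter_split_perm _ _ rem
      have he : rem.filter (fun p => pvNearC radius c p.2 || rest.any (fun c' => pvNearC radius c' p.2))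
          = rem.filter (fun p => (c :: rest).any (fun c' => pvNearC radius c' p.2)) :=
        List.filter_congr (fun x _ => by simp)
      rw [List.append_assoc] at ih1
      rw [← he]
      exact ih1.trans (List.Perm.append_left hs hsplit)

-- mapping snd over an index-filtered enumeration is filtering the list itself
theorem pvMap_snd_filter_enumerate (q : List (String × Int) → Bool)
    (xs : List (List (String × Int))) (s : Int) :
    (((PySem.List.enumerate xs s).filter (fun p => q p.2)).map (fun p => p.2))
      = xs.filter q := by
  induction xs generalizing s with
  | nil => simp [PySem.List.enumerate_nil]
  | cons x rest ih =>
    rw [PySem.List.enumerate_cons]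
    by_cases h : q x
    · simp [h, ih]
    · simp [h, ih]

-- ===== VERDICT (by name: the statement is the Claim_ definition above) =====
theorem classify_regions_spec : Claim_equal_classify_regions := by
  intro regions bases_list radius _ _
  unfold Spec_classify_regions classify_regions classify_regions_alt
  dsimp only
  have hcoords : bases_list.map (fun b => block_to_region b.1 b.2)
      = bases_list.map (fun b => (PySem.Int.floordiv b.1 1024, PySem.Int.floordiv b.2 1024)) := by
    simp [block_to_region]
  rw [hcoords]
  set coords := bases_list.map (fun b => (PySem.Int.floordiv b.1 1024, PySem.Int.floordiv b.2 1024)) with hc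
  rw [pvFoldl_partition (fun r => pvCheckBases r radius coords) regions [] []]
  obtain ⟨h2, h1⟩ := pvFold_sweep radius coords [] (PySem.List.enumerate regions 0)
  have hpair : ((PySem.List.enumerate regions 0).filter
      (fun p => coords.any (fun c => pvNearC radius c p.2))).Pairwise
      (fun a b => a.1 < b.1) :=
    (PySem.List.pairwise_lt_enumerate regions 0).filter _
  have hsorted : PySem.List.sorted (coords.foldl (pvSweep radius)
        ([], PySem.List.enumerate regions 0)).1 (fun p => p.1) false
      = (PySem.List.enumerate regions 0).filter
          (fun p => coords.any (fun c => pvNearC radius c p.2)) := by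
    refine PySem.List.sorted_eq_of_perm_of_pairwise_lt _ _ _ ?_ hpair
    simpa using h1.symm
  refine Prod.ext ?_ (Prod.ext ?_ rfl)
  · dsimp only
    rw [hsorted]
    simp only [List.nil_append]
    have h3 : regions.filter (fun r => pvCheckBases r radius coords)
        = regions.filter (fun r => coords.any (fun c => pvNearC radius c r)) :=
      List.filter_congr (fun r _ => pvCheckBases_eq_any r radius coords)
    rw [h3]
    exact (pvMap_snd_filter_enumerate (fun r => coords.any (fun c => pvNearC radius c r)) regions 0).symm
  · dsimp only
    rw [h2]
    simp only [List.nil_append]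
    have h4 : regions.filter (fun x => !pvCheckBases x radius coords)
        = regions.filter (fun r => !(coords.any (fun c => pvNearC radius c r))) :=
      List.filter_congr (fun r _ => by rw [pvCheckBases_eq_any])
    rw [h4]
    exact (pvMap_snd_filter_enumerate (fun r => !(coords.any (fun c => pvNearC radius c r))) regions 0).symm
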